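-- pv_equiv track=rewrite | github.com/Artbellsonmamuri/Technology-Readiness-Tool | question_data.py | calculate_pathway_scores
-- ===== SOURCE A (Python) =====
-- def calculate_pathway_scores(answers, tcp_data):
--     """Calculate scores for each commercialization pathway"""
--     pathways = {pathway["name"]: 0 for pathway in tcp_data["pathways"]}
--
--     tech_score = sum(answers[0:3])
--     market_score = sum(answers[3:6])
--     business_score = sum(answers[6:9])
--     regulatory_score = sum(answers[9:11])
--     team_score = sum(answers[11:13])
--     strategic_score = sum(answers[13:15])
--
--     pathways["Direct Sale"] = tech_score + business_score + market_score
--     pathways["Licensing"] = tech_score + market_score + (6 - business_score) + regulatory_score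
--     pathways["Startup/Spin-out"] = tech_score + team_score + market_score + strategic_score
--     pathways["Assignment"] = tech_score + (6 - strategic_score) + (6 - business_score)
--     pathways["Research Collaboration"] = (9 - tech_score) + team_score + strategic_score + market_score
--     pathways["Open Source"] = strategic_score + market_score + (6 - regulatory_score) + team_score
--     pathways["Government Procurement"] = tech_score + regulatory_score + market_score + business_score
--
--     return pathways
-- ===== SOURCE B (Python) =====
-- # Pathway names in the order A's assignments create them, with their constant offsets
-- # (the (6-x)/(9-x) terms folded into constants).
-- _NAMES = ["Direct Sale", "Licensing", "Startup/Spin-out", "Assignment",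
--           "Research Collaboration", "Open Source", "Government Procurement"]
-- _OFFSETS = [0, 6, 0, 12, 9, 6, 0]
-- # which score segment each answer index 0..14 belongs to
-- _SEG = [0, 0, 0, 1, 1, 1, 2, 2, 2, 3, 3, 4, 4, 5, 5]
-- # per segment: the sign with which one answer of that segment enters each pathway total
-- _SIGNS = [
--     [1, 1, 1, 1, -1, 0, 1],   # tech
--     [1, 1, 1, 0, 1, 1, 1],    # market
--     [1, -1, 0, -1, 0, 0, 1],  # business
--     [0, 1, 0, 0, 0, -1, 1],   # regulatory
--     [0, 0, 1, 0, 1, 1, 0],    # team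
--     [0, 0, 1, -1, 1, 1, 0],   # strategic
-- ]
--
--
-- def calculate_pathway_scores(answers, tcp_data):
--     """Single pass: fold each answer into all seven running pathway totals at once."""
--     result = {p["name"]: 0 for p in tcp_data["pathways"]}
--     totals = list(_OFFSETS)
--     for i, v in enumerate(answers[:15]):
--         sg = _SIGNS[_SEG[i]]
--         totals = [t + s * v for t, s in zip(totals, sg)]
--     for name, t in zip(_NAMES, totals):
--         result[name] = t
--     return result
-- ===== Notes on version B (the rewrite author's own statement) =====
-- stated objective: alternative
-- what changed: Instead of computing six segment sums and seven hand-written formulas, B makes one pass over enumerate(answers[:15]) folding each answer, with a per-segment sign row, into a vector of seven running pathway totals initialized to the folded constant offsets.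
import Mathlib
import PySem

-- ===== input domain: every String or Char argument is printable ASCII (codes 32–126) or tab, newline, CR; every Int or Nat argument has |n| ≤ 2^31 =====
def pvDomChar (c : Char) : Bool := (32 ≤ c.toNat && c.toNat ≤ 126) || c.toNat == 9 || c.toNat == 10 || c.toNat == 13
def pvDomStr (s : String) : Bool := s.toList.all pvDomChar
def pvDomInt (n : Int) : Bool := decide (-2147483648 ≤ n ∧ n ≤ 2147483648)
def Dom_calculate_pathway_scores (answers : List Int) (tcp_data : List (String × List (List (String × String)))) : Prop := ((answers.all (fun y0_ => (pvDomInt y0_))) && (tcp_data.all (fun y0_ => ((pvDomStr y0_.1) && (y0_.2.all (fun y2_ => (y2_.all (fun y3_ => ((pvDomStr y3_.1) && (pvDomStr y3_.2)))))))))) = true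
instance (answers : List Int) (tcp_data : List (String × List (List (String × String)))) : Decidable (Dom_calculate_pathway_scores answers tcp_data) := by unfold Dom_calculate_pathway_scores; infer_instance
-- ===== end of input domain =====

-- B replaces the six segment sums + seven formulas by ONE pass over enumerate(answers[:15])
-- folding each answer (with a per-segment sign row) into seven running totals; same cost.

-- ===== PORT A =====
-- the dict comprehension {pathway["name"]: 0 for pathway in ...}; a pathway without "name"
-- would raise KeyError in Python (excluded by Pre_), here it is skipped
def pvInitPathways (ps : List (List (String × String))) : PySem.Dict String Int :=
  ps.foldl (fun d p =>
    match (PySem.Dict.mk p).get? "name" with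
    | none => d
    | some nm => d.insert nm 0) PySem.Dict.empty

def calculate_pathway_scores (answers : List Int) (tcp_data : List (String × List (List (String × String)))) : List (String × Int) :=
  match (PySem.Dict.mk tcp_data).get? "pathways" with
  | none => []   -- Python raises KeyError here; excluded by Pre_
  | some ps =>
    let pathways := pvInitPathways ps
    let tech_score := (PySem.List.slice answers (some 0) (some 3)).sum
    let market_score := (PySem.List.slice answers (some 3) (some 6)).sum
    let business_score := (PySem.List.slice answers (some 6) (some 9)).sum
    let regulatory_score := (PySem.List.slice answers (some 9) (some 11)).sum
    let team_score := (PySem.List.slice answers (some 11) (some 13)).sum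
    let strategic_score := (PySem.List.slice answers (some 13) (some 15)).sum
    let pathways := pathways.insert "Direct Sale" (tech_score + business_score + market_score)
    let pathways := pathways.insert "Licensing" (tech_score + market_score + (6 - business_score) + regulatory_score)
    let pathways := pathways.insert "Startup/Spin-out" (tech_score + team_score + market_score + strategic_score)
    let pathways := pathways.insert "Assignment" (tech_score + (6 - strategic_score) + (6 - business_score))
    let pathways := pathways.insert "Research Collaboration" ((9 - tech_score) + team_score + strategic_score + market_score)
    let pathways := pathways.insert "Open Source" (strategic_score + market_score + (6 - regulatory_score) + team_score)
    let pathways := pathways.insert "Government Procurement" (tech_score + regulatory_score + market_score + business_score)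
    pathways.items

-- ===== PORT B =====
def pvNames : List String :=
  ["Direct Sale", "Licensing", "Startup/Spin-out", "Assignment",
   "Research Collaboration", "Open Source", "Government Procurement"]
def pvOffsets : List Int := [0, 6, 0, 12, 9, 6, 0]
def pvSeg : List Int := [0, 0, 0, 1, 1, 1, 2, 2, 2, 3, 3, 4, 4, 5, 5]
def pvSigns : List (List Int) :=
  [[1, 1, 1, 1, -1, 0, 1],
   [1, 1, 1, 0, 1, 1, 1],
   [1, -1, 0, -1, 0, 0, 1],
   [0, 1, 0, 0, 0, -1, 1],
   [0, 0, 1, 0, 1, 1, 0],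
   [0, 0, 1, -1, 1, 1, 0]]

def calculate_pathway_scores_alt (answers : List Int) (tcp_data : List (String × List (List (String × String)))) : List (String × Int) :=
  match (PySem.Dict.mk tcp_data).get? "pathways" with
  | none => []   -- Python raises KeyError here; excluded by Pre_
  | some ps =>
    let result := pvInitPathways ps
    let totals := (PySem.List.enumerate (PySem.List.slice answers none (some 15))).foldl
      (fun totals iv =>
        let sg := PySem.List.pyGetD pvSigns (PySem.List.pyGetD pvSeg iv.1 0) []
        List.zipWith (fun t s => t + s * iv.2) totals sg)
      pvOffsets
    ((pvNames.zip totals).foldl (fun d nt => d.insert nt.1 nt.2) result).items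

-- ===== PRECONDITION & SPEC =====
-- Pre_ excludes exactly the inputs where Python A raises KeyError: tcp_data without a
-- "pathways" key, or a pathway dict in it without a "name" key.
def Pre_calculate_pathway_scores (answers : List Int) (tcp_data : List (String × List (List (String × String)))) : Prop :=
  (((PySem.Dict.mk tcp_data).get? "pathways").map
    (fun ps => ps.all (fun p => (PySem.Dict.mk p).contains "name"))) = some true
instance (answers : List Int) (tcp_data : List (String × List (List (String × String)))) : Decidable (Pre_calculate_pathway_scores answers tcp_data) := by unfold Pre_calculate_pathway_scores; infer_instance

def pvWitness_calculate_pathway_scores : List Int × (List (String × List (List (String × String)))) :=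
  ([1, 2, 3, 0, 1, 0, 2, 2, 2, 1, 1, 3, 0, 1, 1],
   [("pathways", [[("name", "Direct Sale")], [("name", "Custom Path")]])])

def Spec_calculate_pathway_scores (answers : List Int) (tcp_data : List (String × List (List (String × String)))) (out : List (String × Int)) : Prop := out = calculate_pathway_scores_alt answers tcp_data
instance (answers : List Int) (tcp_data : List (String × List (List (String × String)))) (out : List (String × Int)) : Decidable (Spec_calculate_pathway_scores answers tcp_data out) := by unfold Spec_calculate_pathway_scores; infer_instance

-- ===== CLAIM (what is proved, stated in full; the proofs are below) =====
def Claim_equal_calculate_pathway_scores : Prop := ∀ (answers : List Int) (tcp_data : List (String × List (List (String × String)))), Dom_calculate_pathway_scores answers tcp_data → Pre_calculate_pathway_scores answers tcp_data → Spec_calculate_pathway_scores answers tcp_data (calculate_pathway_scores answers tcp_data)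

-- ===== LEMMAS AND PROOFS =====
theorem pv_slice_eval (xs : List Int) (a b : Nat) :
    PySem.List.slice xs (some (a : Int)) (some (b : Int)) = (xs.drop a).take (b - a) :=
  PySem.List.slice_natCast xs a b
theorem pv_sl03 (xs : List Int) : PySem.List.slice xs (some 0) (some 3) = xs.take 3 := by
  have h := pv_slice_eval xs 0 3; norm_num at h; simpa using h
theorem pv_sl36 (xs : List Int) : PySem.List.slice xs (some 3) (some 6) = (xs.drop 3).take 3 := by
  have h := pv_slice_eval xs 3 6; norm_num at h; exact h
theorem pv_sl69 (xs : List Int) : PySem.List.slice xs (some 6) (some 9) = (xs.drop 6).take 3 := by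
  have h := pv_slice_eval xs 6 9; norm_num at h; exact h
theorem pv_sl911 (xs : List Int) : PySem.List.slice xs (some 9) (some 11) = (xs.drop 9).take 2 := by
  have h := pv_slice_eval xs 9 11; norm_num at h; exact h
theorem pv_sl1113 (xs : List Int) : PySem.List.slice xs (some 11) (some 13) = (xs.drop 11).take 2 := by
  have h := pv_slice_eval xs 11 13; norm_num at h; exact h
theorem pv_sl1315 (xs : List Int) : PySem.List.slice xs (some 13) (some 15) = (xs.drop 13).take 2 := by
  have h := pv_slice_eval xs 13 15; norm_num at h; exact h
theorem pv_sl15 (xs : List Int) : PySem.List.slice xs none (some 15) = xs.take 15 := by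
  have h := PySem.List.slice_to_natCast xs 15; norm_num at h; exact h
theorem pv_sg0 : PySem.List.pyGetD pvSeg 0 0 = 0 := by decide
theorem pv_sg1 : PySem.List.pyGetD pvSeg 1 0 = 0 := by decide
theorem pv_sg2 : PySem.List.pyGetD pvSeg 2 0 = 0 := by decide
theorem pv_sg3 : PySem.List.pyGetD pvSeg 3 0 = 1 := by decide
theorem pv_sg4 : PySem.List.pyGetD pvSeg 4 0 = 1 := by decide
theorem pv_sg5 : PySem.List.pyGetD pvSeg 5 0 = 1 := by decide
theorem pv_sg6 : PySem.List.pyGetD pvSeg 6 0 = 2 := by decide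
theorem pv_sg7 : PySem.List.pyGetD pvSeg 7 0 = 2 := by decide
theorem pv_sg8 : PySem.List.pyGetD pvSeg 8 0 = 2 := by decide
theorem pv_sg9 : PySem.List.pyGetD pvSeg 9 0 = 3 := by decide
theorem pv_sg10 : PySem.List.pyGetD pvSeg 10 0 = 3 := by decide
theorem pv_sg11 : PySem.List.pyGetD pvSeg 11 0 = 4 := by decide
theorem pv_sg12 : PySem.List.pyGetD pvSeg 12 0 = 4 := by decide
theorem pv_sg13 : PySem.List.pyGetD pvSeg 13 0 = 5 := by decide
theorem pv_sg14 : PySem.List.pyGetD pvSeg 14 0 = 5 := by decide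
theorem pv_sn0 : PySem.List.pyGetD pvSigns 0 ([] : List Int) = [1, 1, 1, 1, -1, 0, 1] := by decide
theorem pv_sn1 : PySem.List.pyGetD pvSigns 1 ([] : List Int) = [1, 1, 1, 0, 1, 1, 1] := by decide
theorem pv_sn2 : PySem.List.pyGetD pvSigns 2 ([] : List Int) = [1, -1, 0, -1, 0, 0, 1] := by decide
theorem pv_sn3 : PySem.List.pyGetD pvSigns 3 ([] : List Int) = [0, 1, 0, 0, 0, -1, 1] := by decide
theorem pv_sn4 : PySem.List.pyGetD pvSigns 4 ([] : List Int) = [0, 0, 1, 0, 1, 1, 0] := by decide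
theorem pv_sn5 : PySem.List.pyGetD pvSigns 5 ([] : List Int) = [0, 0, 1, -1, 1, 1, 0] := by decide

-- ===== VERDICT (by name: the statement is the Claim_ definition above) =====
set_option maxHeartbeats 2000000 in
theorem calculate_pathway_scores_spec : Claim_equal_calculate_pathway_scores := by
  intro answers tcp_data _ _
  unfold Spec_calculate_pathway_scores calculate_pathway_scores calculate_pathway_scores_alt
  cases h : (PySem.Dict.mk tcp_data).get? "pathways" with
  | none => rfl
  | some ps =>
    rcases answers with _|⟨a0,_|⟨a1,_|⟨a2,_|⟨a3,_|⟨a4,_|⟨a5,_|⟨a6,_|⟨a7,_|⟨a8,_|⟨a9,_|⟨a10,_|⟨a11,_|⟨a12,_|⟨a13,_|⟨a14,rest⟩⟩⟩⟩⟩⟩⟩⟩⟩⟩⟩⟩⟩⟩⟩ <;>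
    · simp only [pv_sl03, pv_sl36, pv_sl69, pv_sl911, pv_sl1113, pv_sl1315, pv_sl15,
        pvOffsets, pvNames]
      norm_num [PySem.List.enumerate, List.foldl, List.zip, List.zipWith,
        List.sum_cons, List.sum_nil, pv_sg0, pv_sg1, pv_sg2, pv_sg3, pv_sg4, pv_sg5, pv_sg6, pv_sg7, pv_sg8, pv_sg9, pv_sg10, pv_sg11, pv_sg12, pv_sg13, pv_sg14, pv_sn0, pv_sn1, pv_sn2, pv_sn3, pv_sn4, pv_sn5]
      try ring_nf
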